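-- pv_equiv track=rewrite | github.com/sumitmallick/InterviewExperience | student_attendance_probability.py | attendance_probability
-- ===== SOURCE A (Python) =====
-- def attendance_probability(N):
--     if N < 4:
--         return f"0/{2**N}"  # Less than 4 days means we can't miss 4 consecutive days
--
--     dp = [0] * (N + 1)
--     dp[0] = 1
--     dp[1] = 2
--     dp[2] = 4
--     dp[3] = 8
--
--     for i in range(4, N+1):
--         dp[i] = dp[i-1] + dp[i-2] + dp[i-3] + dp[i-4]
--
--     total_ways = 2 ** N
--     ways_to_miss = sum(dp[:N-3])
--
--     return f"{ways_to_miss}/{total_ways}"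
-- ===== SOURCE B (Python) =====
-- def _dot(r, c):
--     return r[0] * c[0] + r[1] * c[1] + r[2] * c[2] + r[3] * c[3]
--
--
-- def _mat_mul(A, B):
--     cols = tuple(zip(*B))
--     return tuple(tuple(_dot(row, col) for col in cols) for row in A)
--
--
-- def attendance_probability(N):
--     # Matrix power of the tetranacci companion matrix (binary exponentiation,
--     # O(log N) matrix multiplications) instead of an O(N) dp table; the prefix
--     # sum is recovered with the closed identity 3*S(k) = T(k+3) - T(k+1) - 2*T(k) - 4.
--     if N < 4:
--         return f"0/{1 << N}"
--     M = ((1, 1, 1, 1), (1, 0, 0, 0), (0, 1, 0, 0), (0, 0, 1, 0))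
--     P = ((1, 0, 0, 0), (0, 1, 0, 0), (0, 0, 1, 0), (0, 0, 0, 1))
--     e = N - 3
--     while e:
--         if e & 1:
--             P = _mat_mul(P, M)
--         M = _mat_mul(M, M)
--         e >>= 1
--     v0 = (8, 4, 2, 1)
--     tN, _tNm1, tNm2, tNm3 = (_dot(row, v0) for row in P)
--     miss = (tN - tNm2 - 2 * tNm3 - 4) // 3
--     return f"{miss}/{1 << N}"
-- ===== Notes on version B (the rewrite author's own statement) =====
-- stated objective: faster
-- what changed: Replaces the O(N)-entry dp table and its separate summing pass with binary exponentiation of the 4x4 tetranacci companion matrix (O(log N) matrix multiplications), recovering the prefix sum via the closed identity 3*S(k) = T(k+3) - T(k+1) - 2*T(k) - 4.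
-- outside the precondition, e.g. on attendance_probability(-2): A returns '0/0.25', B raises ValueError
import Mathlib
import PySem

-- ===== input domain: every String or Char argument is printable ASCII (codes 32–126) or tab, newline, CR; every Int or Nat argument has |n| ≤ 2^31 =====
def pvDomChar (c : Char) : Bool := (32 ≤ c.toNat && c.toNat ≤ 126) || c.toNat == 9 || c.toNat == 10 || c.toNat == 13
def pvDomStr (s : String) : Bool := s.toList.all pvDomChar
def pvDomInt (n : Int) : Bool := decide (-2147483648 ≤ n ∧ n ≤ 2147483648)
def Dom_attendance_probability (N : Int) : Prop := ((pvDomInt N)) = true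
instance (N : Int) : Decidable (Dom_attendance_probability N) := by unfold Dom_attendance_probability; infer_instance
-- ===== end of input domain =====

-- B replaces the O(N)-step dp table by binary exponentiation of the 4x4 tetranacci
-- companion matrix plus a closed prefix-sum identity (objective: alternative).

-- ===== PORT A =====
-- the body of A's for-loop: dp[i] = dp[i-1] + dp[i-2] + dp[i-3] + dp[i-4]
def pvStep (dp : List Int) (i : Int) : List Int :=
  PySem.List.pySetD dp i
    (PySem.List.pyGetD dp (i - 1) 0 + PySem.List.pyGetD dp (i - 2) 0 +
     PySem.List.pyGetD dp (i - 3) 0 + PySem.List.pyGetD dp (i - 4) 0)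

def attendance_probability (N : Int) : String :=
  if N < 4 then "0/" ++ PySem.Int.toStr (2 ^ N.toNat)   -- 2**N; exact for 0 ≤ N (Pre_ excludes N < 0, where Python yields a float)
  else
    let dp0 : List Int :=
      PySem.List.pySetD (PySem.List.pySetD (PySem.List.pySetD (PySem.List.pySetD
        (List.replicate (N + 1).toNat (0 : Int)) 0 1) 1 2) 2 4) 3 8
    let dp := (PySem.List.pyRange 4 (N + 1) 1).foldl pvStep dp0
    let total := (2 : Int) ^ N.toNat
    let ways := (PySem.List.slice dp none (some (N - 3))).sum
    PySem.Int.toStr ways ++ "/" ++ PySem.Int.toStr total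

-- ===== PORT B =====
-- rows and matrices are 4-tuples, as Source B's tuples of tuples
abbrev pvV : Type := Int × Int × Int × Int
abbrev pvM : Type := pvV × pvV × pvV × pvV

-- Source B's _dot
def pvDot (r c : pvV) : Int :=
  r.1 * c.1 + r.2.1 * c.2.1 + r.2.2.1 * c.2.2.1 + r.2.2.2 * c.2.2.2

-- cols = tuple(zip(*B))
def pvTranspose (B : pvM) : pvM :=
  ((B.1.1, B.2.1.1, B.2.2.1.1, B.2.2.2.1),
   (B.1.2.1, B.2.1.2.1, B.2.2.1.2.1, B.2.2.2.2.1),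
   (B.1.2.2.1, B.2.1.2.2.1, B.2.2.1.2.2.1, B.2.2.2.2.2.1),
   (B.1.2.2.2, B.2.1.2.2.2, B.2.2.1.2.2.2, B.2.2.2.2.2.2))

-- one result row of _mat_mul: dot of a row of A with each column
def pvRowDots (r : pvV) (C : pvM) : pvV :=
  (pvDot r C.1, pvDot r C.2.1, pvDot r C.2.2.1, pvDot r C.2.2.2)

-- Source B's _mat_mul
def pvMatMul (A B : pvM) : pvM :=
  let C := pvTranspose B
  (pvRowDots A.1 C, pvRowDots A.2.1 C, pvRowDots A.2.2.1 C, pvRowDots A.2.2.2 C)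

-- Source B's while-loop over e (binary exponentiation)
def pvPowLoop (P M : pvM) (e : Nat) : pvM :=
  if h : e = 0 then P
  else pvPowLoop (if e % 2 = 1 then pvMatMul P M else P) (pvMatMul M M) (e / 2)
termination_by e
decreasing_by exact Nat.div_lt_self (Nat.pos_of_ne_zero h) (by norm_num)

-- (tN, tNm1, tNm2, tNm3) = (_dot(row, v0) for row in P)
def pvApply (P : pvM) (v : pvV) : pvV :=
  (pvDot P.1 v, pvDot P.2.1 v, pvDot P.2.2.1 v, pvDot P.2.2.2 v)

def attendance_probability_alt (N : Int) : String :=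
  if N < 4 then "0/" ++ PySem.Int.toStr ((1 : Int) <<< N.toNat)   -- 1 << N; exact for 0 ≤ N (Python raises for N < 0)
  else
    let M0 : pvM := ((1, 1, 1, 1), (1, 0, 0, 0), (0, 1, 0, 0), (0, 0, 1, 0))
    let I0 : pvM := ((1, 0, 0, 0), (0, 1, 0, 0), (0, 0, 1, 0), (0, 0, 0, 1))
    let P := pvPowLoop I0 M0 (N - 3).toNat
    let t := pvApply P (8, 4, 2, 1)
    let miss := PySem.Int.floordiv (t.1 - t.2.2.1 - 2 * t.2.2.2 - 4) 3
    PySem.Int.toStr miss ++ "/" ++ PySem.Int.toStr ((1 : Int) <<< N.toNat)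

-- ===== PRECONDITION & SPEC =====
-- Pre_ excludes negative N: there A's 2**N is a Python float (A returns e.g. "0/0.25"), outside the
-- declared Int/String semantics, and B's 1 << N raises ValueError.
def Pre_attendance_probability (N : Int) : Prop := 0 ≤ N
instance (N : Int) : Decidable (Pre_attendance_probability N) := by unfold Pre_attendance_probability; infer_instance
def pvWitness_attendance_probability : Int := (6)
def Spec_attendance_probability (N : Int) (out : String) : Prop := out = attendance_probability_alt N
instance (N : Int) (out : String) : Decidable (Spec_attendance_probability N out) := by unfold Spec_attendance_probability; infer_instance

-- ===== CLAIM (what is proved, stated in full; the proofs are below) =====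
def Claim_equal_attendance_probability : Prop := ∀ (N : Int), Dom_attendance_probability N → Pre_attendance_probability N → Spec_attendance_probability N (attendance_probability N)

-- ===== LEMMAS AND PROOFS =====

-- the tetranacci sequence both programs compute
def pvT : Nat → Int
  | 0 => 1
  | 1 => 2
  | 2 => 4
  | 3 => 8
  | n + 4 => pvT (n + 3) + pvT (n + 2) + pvT (n + 1) + pvT n

-- prefix sums: pvS k = pvT 0 + … + pvT (k-1)
def pvS : Nat → Int
  | 0 => 0
  | k + 1 => pvS k + pvT k

theorem pvShift_eq_pow (k : Nat) : (1 : Int) <<< k = 2 ^ k := by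
  rw [Int.shiftLeft_eq]; ring

-- ---- A-side lemmas ----

-- initial dp array of A, for N = n ≥ 4
theorem pvDp0_eq (n : Nat) (hn : 4 ≤ n) :
    PySem.List.pySetD (PySem.List.pySetD (PySem.List.pySetD (PySem.List.pySetD
      (List.replicate (n + 1) (0 : Int)) 0 1) 1 2) 2 4) 3 8 =
      1 :: 2 :: 4 :: 8 :: List.replicate (n - 3) 0 := by
  have h : n + 1 = 4 + (n - 3) := by omega
  rw [h, List.replicate_add]
  simp [PySem.List.pySetD_of_nonneg, List.replicate, List.set]

theorem pvFold_inv (n : Nat) (hn : 4 ≤ n) (m : Nat) (hm3 : 3 ≤ m) (hmn : m ≤ n) :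
    ((PySem.List.pyRange 4 ((m : Int) + 1) 1).foldl pvStep
        (1 :: 2 :: 4 :: 8 :: List.replicate (n - 3) (0 : Int))).length = n + 1 ∧
    ∀ j : Nat, j ≤ m →
      PySem.List.pyGetD ((PySem.List.pyRange 4 ((m : Int) + 1) 1).foldl pvStep
        (1 :: 2 :: 4 :: 8 :: List.replicate (n - 3) (0 : Int))) (j : Int) 0 = pvT j := by
  induction m, hm3 using Nat.le_induction with
  | base =>
      rw [PySem.List.pyRange_one_eq_nil (by norm_num)]
      constructor
      · simp; omega
      · intro j hj
        rw [PySem.List.pyGetD_natCast]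
        interval_cases j <;> simp [pvT, List.getD]
  | succ m hm ih =>
      obtain ⟨ihlen, ihval⟩ := ih (by omega)
      push_cast
      have hsplit : PySem.List.pyRange 4 ((m : Int) + 1 + 1) 1 =
          PySem.List.pyRange 4 ((m : Int) + 1) 1 ++ [(m : Int) + 1] := by
        have := PySem.List.pyRange_one_succ_right (a := 4) (b := (m : Int) + 1) (by omega)
        simpa using this
      set dpm := (PySem.List.pyRange 4 ((m : Int) + 1) 1).foldl pvStep
        (1 :: 2 :: 4 :: 8 :: List.replicate (n - 3) (0 : Int)) with hdpm
      have hcast : ((m : Int) + 1) = ((m + 1 : Nat) : Int) := by push_cast; ring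
      have hstep : (PySem.List.pyRange 4 ((m : Int) + 1 + 1) 1).foldl pvStep
          (1 :: 2 :: 4 :: 8 :: List.replicate (n - 3) (0 : Int)) = pvStep dpm ((m : Int) + 1) := by
        rw [hsplit, List.foldl_append]; simp [hdpm]
      have hlt : m + 1 < dpm.length := by omega
      have hv : PySem.List.pyGetD dpm ((m : Int) + 1 - 1) 0 +
          PySem.List.pyGetD dpm ((m : Int) + 1 - 2) 0 +
          PySem.List.pyGetD dpm ((m : Int) + 1 - 3) 0 +
          PySem.List.pyGetD dpm ((m : Int) + 1 - 4) 0 = pvT (m + 1) := by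
        have e1 : (m : Int) + 1 - 1 = ((m : Nat) : Int) := by ring
        have e2 : (m : Int) + 1 - 2 = ((m - 1 : Nat) : Int) := by omega
        have e3 : (m : Int) + 1 - 3 = ((m - 2 : Nat) : Int) := by omega
        have e4 : (m : Int) + 1 - 4 = ((m - 3 : Nat) : Int) := by omega
        rw [e1, e2, e3, e4, ihval m le_rfl, ihval (m - 1) (by omega),
          ihval (m - 2) (by omega), ihval (m - 3) (by omega)]
        have hm4 : m + 1 = (m - 3) + 4 := by omega
        have a1 : m - 3 + 3 = m := by omega
        have a2 : m - 3 + 2 = m - 1 := by omega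
        have a3 : m - 3 + 1 = m - 2 := by omega
        rw [hm4, pvT, a1, a2, a3]
      rw [hstep]
      unfold pvStep
      rw [hv, hcast]
      have hlt2 : m + 1 < dpm.length := by omega
      constructor
      · rw [PySem.List.pySetD_natCast]; simpa using ihlen
      · intro j hj
        rw [PySem.List.pyGetD_pySetD_natCast dpm (m + 1) j _ _ hlt2]
        by_cases hje : j = m + 1
        · subst hje; simp
        · rw [if_neg hje]
          exact ihval j (by omega)

theorem pvSum_take (dp : List Int) (k : Nat) (hk : k ≤ dp.length)
    (h : ∀ j, j < k → PySem.List.pyGetD dp (j : Int) 0 = pvT j) :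
    (dp.take k).sum = pvS k := by
  induction k with
  | zero => simp [pvS]
  | succ k ih =>
      rw [List.sum_take_succ dp k (by omega), ih (by omega) (fun j hj => h j (by omega)), pvS]
      congr 1
      have := h k (by omega)
      rwa [PySem.List.pyGetD_natCast, List.getD_eq_getElem dp 0 (by omega)] at this

-- ---- B-side lemmas ----

-- applying a product matrix = applying the two factors in turn
theorem pvApply_matMul (A B : pvM) (v : pvV) :
    pvApply (pvMatMul A B) v = pvApply A (pvApply B v) := by
  obtain ⟨⟨a0, a1, a2, a3⟩, ⟨b0, b1, b2, b3⟩, ⟨c0, c1, c2, c3⟩, ⟨d0, d1, d2, d3⟩⟩ := A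
  obtain ⟨⟨e0, e1, e2, e3⟩, ⟨f0, f1, f2, f3⟩, ⟨g0, g1, g2, g3⟩, ⟨h0, h1, h2, h3⟩⟩ := B
  obtain ⟨v0, v1, v2, v3⟩ := v
  simp only [pvMatMul, pvTranspose, pvRowDots, pvApply, pvDot, Prod.mk.injEq]
  refine ⟨by ring, by ring, by ring, by ring⟩

theorem pvPowLoop_apply (e : Nat) (P M : pvM) (v : pvV) :
    pvApply (pvPowLoop P M e) v = pvApply P ((fun w => pvApply M w)^[e] v) := by
  induction e using Nat.strong_induction_on generalizing P M v with
  | _ e ih =>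
      rw [pvPowLoop]
      by_cases h0 : e = 0
      · simp [h0]
      · rw [dif_neg h0, ih (e / 2) (Nat.div_lt_self (Nat.pos_of_ne_zero h0) (by norm_num))]
        have hMM : (fun w => pvApply (pvMatMul M M) w) =
            (fun w => pvApply M w) ∘ (fun w => pvApply M w) := by
          funext w; exact pvApply_matMul M M w
        have hiter : ∀ k : Nat, (fun w => pvApply (pvMatMul M M) w)^[k] v =
            (fun w => pvApply M w)^[2 * k] v := by
          intro k
          rw [hMM, Function.iterate_mul]
          simp [Function.iterate_succ]
        rw [hiter]
        by_cases hodd : e % 2 = 1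
        · rw [if_pos hodd, pvApply_matMul]
          have he : 2 * (e / 2) + 1 = e := by omega
          rw [← Function.iterate_succ_apply' (fun w => pvApply M w) (2 * (e / 2)) v]
          rw [Nat.succ_eq_add_one, he]
        · rw [if_neg hodd]
          have he : 2 * (e / 2) = e := by omega
          rw [he]

-- one application of the companion matrix advances the tetranacci window
theorem pvApply_M0_step (n : Nat) :
    pvApply ((1, 1, 1, 1), (1, 0, 0, 0), (0, 1, 0, 0), (0, 0, 1, 0))
      (pvT (n + 3), pvT (n + 2), pvT (n + 1), pvT n) =
      (pvT (n + 4), pvT (n + 3), pvT (n + 2), pvT (n + 1)) := by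
  simp only [pvApply, pvDot, Prod.mk.injEq]
  refine ⟨by rw [pvT]; ring, by ring, by ring, by ring⟩

theorem pvIter_M0 (e : Nat) :
    (fun w => pvApply ((1, 1, 1, 1), (1, 0, 0, 0), (0, 1, 0, 0), (0, 0, 1, 0)) w)^[e]
      ((8 : Int), (4 : Int), (2 : Int), (1 : Int)) =
      (pvT (e + 3), pvT (e + 2), pvT (e + 1), pvT e) := by
  induction e with
  | zero => simp [pvT]
  | succ e ih =>
      rw [Function.iterate_succ_apply', ih]
      exact pvApply_M0_step e

theorem pvApply_id (v : pvV) :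
    pvApply ((1, 0, 0, 0), (0, 1, 0, 0), (0, 0, 1, 0), (0, 0, 0, 1)) v = v := by
  obtain ⟨v0, v1, v2, v3⟩ := v
  simp [pvApply, pvDot]

-- the closed prefix-sum identity B uses
theorem pvS_closed (k : Nat) :
    3 * pvS k = pvT (k + 3) - pvT (k + 1) - 2 * pvT k - 4 := by
  induction k with
  | zero => simp [pvS, pvT]
  | succ k ih =>
      rw [pvS, show k + 1 + 3 = k + 4 by ring, pvT]
      rw [mul_add, ih]
      ring

-- ---- main proof ----

theorem attendance_probability_spec : Claim_equal_attendance_probability := by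
  intro N _ hPre
  unfold Spec_attendance_probability attendance_probability attendance_probability_alt
  by_cases h4 : N < 4
  · rw [if_pos h4, if_pos h4, pvShift_eq_pow]
  · obtain ⟨n, rfl⟩ : ∃ n : Nat, N = (n : Int) := ⟨N.toNat, (Int.toNat_of_nonneg hPre).symm⟩
    have hn : 4 ≤ n := by
      have := not_lt.mp h4; exact_mod_cast this
    rw [if_neg h4, if_neg h4]
    simp only
    have ht1 : ((n : Int) + 1).toNat = n + 1 := by omega
    have ht3 : ((n : Int) - 3).toNat = n - 3 := by omega
    have htn : ((n : Int)).toNat = n := by omega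
    rw [ht1, ht3, htn, pvDp0_eq n hn]
    obtain ⟨hlen, hval⟩ := pvFold_inv n hn n (by omega) le_rfl
    set dpn := (PySem.List.pyRange 4 ((n : Int) + 1) 1).foldl pvStep
      (1 :: 2 :: 4 :: 8 :: List.replicate (n - 3) (0 : Int)) with hdpn
    have hsl : (n : Int) - 3 = ((n - 3 : Nat) : Int) := by omega
    have hways : (PySem.List.slice dpn none (some ((n : Int) - 3))).sum = pvS (n - 3) := by
      rw [hsl, PySem.List.slice_to_natCast]
      exact pvSum_take dpn (n - 3) (by omega) (fun j hj => hval j (by omega))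
    have hB : pvApply (pvPowLoop ((1, 0, 0, 0), (0, 1, 0, 0), (0, 0, 1, 0), (0, 0, 0, 1))
        ((1, 1, 1, 1), (1, 0, 0, 0), (0, 1, 0, 0), (0, 0, 1, 0)) (n - 3)) (8, 4, 2, 1) =
        (pvT (n - 3 + 3), pvT (n - 3 + 2), pvT (n - 3 + 1), pvT (n - 3)) := by
      rw [pvPowLoop_apply, pvIter_M0, pvApply_id]
    have e3 : n - 3 + 3 = n := by omega
    have e2 : n - 3 + 2 = n - 1 := by omega
    have e1 : n - 3 + 1 = n - 2 := by omega
    rw [e3, e2, e1] at hB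
    rw [hB]
    have hmiss : PySem.Int.floordiv (pvT n - pvT (n - 2) - 2 * pvT (n - 3) - 4) 3 =
        pvS (n - 3) := by
      have h3 : pvT n - pvT (n - 2) - 2 * pvT (n - 3) - 4 = 3 * pvS (n - 3) := by
        have := pvS_closed (n - 3)
        rw [show n - 3 + 3 = n from e3, show n - 3 + 1 = n - 2 from e1] at this
        omega
      rw [h3, PySem.Int.floordiv_eq_ediv_of_pos (by norm_num)]
      exact Int.mul_ediv_cancel_left _ (by norm_num)
    rw [hways, hmiss, pvShift_eq_pow]
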